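-- pv_equiv track=rewrite | github.com/Donyes/ReK-Surv | analyze_env_time_focus.py | get_lag_bin
-- ===== SOURCE A (Python) =====
-- LAG_BINS = [
--     ("last_2_days", 0, 1),
--     ("days_3_7", 2, 6),
--     ("days_8_14", 7, 13),
--     ("days_15_30", 14, 29),
--     ("days_31_60", 30, 59),
--     ("days_60_plus", 60, None),
-- ]
--
-- def get_lag_bin(lag: int) -> str:
--     for label, min_lag, max_lag in LAG_BINS:
--         if max_lag is None:
--             if lag >= min_lag:
--                 return label
--         elif min_lag <= lag <= max_lag:
--             return label
--     raise ValueError(f"Unexpected lag value: {lag}")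
-- ===== SOURCE B (Python) =====
-- _STARTS = [0, 2, 7, 14, 30, 60]
-- _LABELS = ["last_2_days", "days_3_7", "days_8_14", "days_15_30",
--            "days_31_60", "days_60_plus"]
--
-- def get_lag_bin(lag: int) -> str:
--     # binary search for the rightmost bin start <= lag
--     lo, hi = 0, len(_STARTS)
--     while lo < hi:
--         mid = (lo + hi) // 2
--         if lag < _STARTS[mid]:
--             hi = mid
--         else:
--             lo = mid + 1
--     if lo == 0:
--         raise ValueError(f"Unexpected lag value: {lag}")
--     return _LABELS[lo - 1]
-- ===== Notes on version B (the rewrite author's own statement) =====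
-- stated objective: idiomatic
-- what changed: Replaces the sequential scan over (label,min,max) range triples with a binary search over the sorted bin start boundaries, indexing into a parallel label list.
import Mathlib
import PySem

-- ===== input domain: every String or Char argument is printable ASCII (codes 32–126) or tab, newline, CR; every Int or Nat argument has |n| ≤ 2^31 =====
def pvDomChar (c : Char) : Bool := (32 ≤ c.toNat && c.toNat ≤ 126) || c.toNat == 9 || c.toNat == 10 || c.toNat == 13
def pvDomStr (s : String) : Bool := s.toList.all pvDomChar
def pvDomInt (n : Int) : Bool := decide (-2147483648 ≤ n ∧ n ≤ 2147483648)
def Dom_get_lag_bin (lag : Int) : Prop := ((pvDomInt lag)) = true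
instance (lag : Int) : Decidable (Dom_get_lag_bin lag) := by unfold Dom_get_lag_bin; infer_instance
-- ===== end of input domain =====

-- B replaces A's sequential scan of (label,min,max) triples by a binary search over
-- the sorted bin-start boundaries (idiomatic bisect_right); same values, same raises.

-- ===== PORT A =====
def pvLAG_BINS : List (String × Int × Option Int) :=
  [("last_2_days", 0, some 1),
   ("days_3_7", 2, some 6),
   ("days_8_14", 7, some 13),
   ("days_15_30", 14, some 29),
   ("days_31_60", 30, some 59),
   ("days_60_plus", 60, none)]

-- A's for-loop; falling off the end is the ValueError, excluded by Pre_ (returns "" here)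
def get_lag_bin_loop (lag : Int) : List (String × Int × Option Int) → String
  | [] => ""
  | (label, min_lag, max_lag) :: rest =>
    match max_lag with
    | none => if lag ≥ min_lag then label else get_lag_bin_loop lag rest
    | some mx => if min_lag ≤ lag ∧ lag ≤ mx then label else get_lag_bin_loop lag rest

def get_lag_bin (lag : Int) : String := get_lag_bin_loop lag pvLAG_BINS

-- ===== PORT B =====
def pvSTARTS : List Int := [0, 2, 7, 14, 30, 60]
def pvLABELS : List String :=
  ["last_2_days", "days_3_7", "days_8_14", "days_15_30", "days_31_60", "days_60_plus"]

-- B's while-loop binary search (bisect_right over pvSTARTS); the fuel argument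
-- (= pvSTARTS.length, an upper bound on the iterations) only makes the loop total
def pvBisect (lag : Int) : Nat → Nat → Nat → Nat
  | 0, lo, _ => lo
  | fuel + 1, lo, hi =>
    if lo < hi then
      let mid := (lo + hi) / 2
      if lag < pvSTARTS.getD mid 0 then pvBisect lag fuel lo mid
      else pvBisect lag fuel (mid + 1) hi
    else lo

-- lo = 0 is B's ValueError, excluded by Pre_ (returns "" here)
def get_lag_bin_alt (lag : Int) : String :=
  let lo := pvBisect lag pvSTARTS.length 0 pvSTARTS.length
  if lo = 0 then "" else pvLABELS.getD (lo - 1) ""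

-- ===== PRECONDITION & SPEC =====
-- Pre_ excludes exactly the negative lags, where both A and B raise the same ValueError.
def Pre_get_lag_bin (lag : Int) : Prop := 0 ≤ lag
instance (lag : Int) : Decidable (Pre_get_lag_bin lag) := by unfold Pre_get_lag_bin; infer_instance
def pvWitness_get_lag_bin : Int := (7)

def Spec_get_lag_bin (lag : Int) (out : String) : Prop := out = get_lag_bin_alt lag
instance (lag : Int) (out : String) : Decidable (Spec_get_lag_bin lag out) := by unfold Spec_get_lag_bin; infer_instance

-- ===== CLAIM (what is proved, stated in full; the proofs are below) =====
def Claim_equal_get_lag_bin : Prop := ∀ (lag : Int), Dom_get_lag_bin lag → Pre_get_lag_bin lag → Spec_get_lag_bin lag (get_lag_bin lag)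

-- ===== LEMMAS AND PROOFS =====

lemma pvBisect_eval (lag : Int) (h : 0 ≤ lag) :
    pvBisect lag 6 0 6 =
      if lag < 2 then 1 else if lag < 7 then 2 else if lag < 14 then 3
      else if lag < 30 then 4 else if lag < 60 then 5 else 6 := by
  have h0 : ¬ lag < 0 := by omega
  by_cases h2 : lag < 2
  · simp [pvBisect, pvSTARTS, h0, h2, show lag < 7 from by omega,
      show lag < 14 from by omega]
  · by_cases h7 : lag < 7
    · simp [pvBisect, pvSTARTS, h0, h2, h7, show lag < 14 from by omega]
    · by_cases h14 : lag < 14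
      · simp [pvBisect, pvSTARTS, h2, h7, h14]
      · by_cases h30 : lag < 30
        · simp [pvBisect, pvSTARTS, h2, h7, h14, h30, show lag < 60 from by omega]
        · by_cases h60 : lag < 60
          · simp [pvBisect, pvSTARTS, h2, h7, h14, h30, h60]
          · simp [pvBisect, pvSTARTS, h2, h7, h14, h30, h60]

-- ===== VERDICT (by name: the statement is the Claim_ definition above) =====
theorem get_lag_bin_spec : Claim_equal_get_lag_bin := by
  intro lag _ hpre
  unfold Spec_get_lag_bin get_lag_bin get_lag_bin_alt
  simp only [pvSTARTS, List.length_cons, List.length_nil]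
  rw [pvBisect_eval lag hpre]
  by_cases h2 : lag < 2
  · simp [get_lag_bin_loop, pvLAG_BINS, pvLABELS, h2, show (0:Int) ≤ lag from hpre, show lag ≤ 1 from by omega]
  · by_cases h7 : lag < 7
    · simp [get_lag_bin_loop, pvLAG_BINS, pvLABELS, h2, h7, hpre,
        show 2 ≤ lag from by omega, show lag ≤ 6 from by omega,
        show ¬ lag ≤ 1 from by omega]
    · by_cases h14 : lag < 14
      · simp [get_lag_bin_loop, pvLAG_BINS, pvLABELS, h2, h7, h14, hpre,
          show 7 ≤ lag from by omega, show lag ≤ 13 from by omega,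
          show ¬ lag ≤ 1 from by omega, show ¬ lag ≤ 6 from by omega]
      · by_cases h30 : lag < 30
        · simp [get_lag_bin_loop, pvLAG_BINS, pvLABELS, h2, h7, h14, h30, hpre,
            show 14 ≤ lag from by omega, show lag ≤ 29 from by omega,
            show ¬ lag ≤ 1 from by omega, show ¬ lag ≤ 6 from by omega,
            show ¬ lag ≤ 13 from by omega]
        · by_cases h60 : lag < 60
          · simp [get_lag_bin_loop, pvLAG_BINS, pvLABELS, h2, h7, h14, h30, h60, hpre,
              show 30 ≤ lag from by omega, show lag ≤ 59 from by omega,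
              show ¬ lag ≤ 1 from by omega, show ¬ lag ≤ 6 from by omega,
              show ¬ lag ≤ 13 from by omega, show ¬ lag ≤ 29 from by omega]
          · simp [get_lag_bin_loop, pvLAG_BINS, pvLABELS, h2, h7, h14, h30, h60, hpre,
              show 60 ≤ lag from by omega,
              show ¬ lag ≤ 1 from by omega, show ¬ lag ≤ 6 from by omega,
              show ¬ lag ≤ 13 from by omega, show ¬ lag ≤ 29 from by omega,
              show ¬ lag ≤ 59 from by omega]
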